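-- pv_equiv track=rewrite | github.com/michaelkitheka123/clc-kenya-app | app/main.py | auto_assign_region
-- ===== SOURCE A (Python) =====
-- REGION_MAPPING = {
--     'nairobi': {
--         'institutions': ['Kenyatta University', 'University of Nairobi', 'Tangaza University College', 'Consolata Shrine Parish', 'St. Paul\'s University Chapel'],
--         'counties': ['Nairobi', 'Kiambu', 'Machakos']
--     },
--     'rift_valley': {
--         'institutions': ['Moi University', 'Catholic Chaplaincy Eldoret', 'Egerton University'],
--         'counties': ['Uasin Gishu', 'Nakuru', 'Elgeyo Marakwet']
--     },
--     'western': {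
--         'institutions': ['Masinde Muliro University', 'Catholic Diocese of Kakamega'],
--         'counties': ['Kakamega', 'Bungoma', 'Vihiga']
--     },
--     'coastal': {
--         'institutions': ['Technical University of Mombasa', 'Catholic Chaplaincy Mombasa'],
--         'counties': ['Mombasa', 'Kilifi', 'Kwale']
--     },
--     'central': {
--         'institutions': ['Dedan Kimathi University', 'Catholic Diocese of Nyeri'],
--         'counties': ['Nyeri', 'Murang\'a', 'Kirinyaga']
--     }
-- }
--
-- def auto_assign_region(occupation, institution=None, residence=None):
--     """Auto-assign region based on institution or residence"""
--     if occupation == 'Student' and institution: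
--         for region, data in REGION_MAPPING.items():
--             if institution in data['institutions']:
--                 return region
--     elif occupation == 'Alumni' and residence:
--         for region, data in REGION_MAPPING.items():
--             if residence in data['counties']:
--                 return region
--     return 'nairobi'  # Default fallback
-- ===== SOURCE B (Python) =====
-- REGION_MAPPING = {
--     'nairobi': {
--         'institutions': ['Kenyatta University', 'University of Nairobi', 'Tangaza University College', 'Consolata Shrine Parish', 'St. Paul\'s University Chapel'],
--         'counties': ['Nairobi', 'Kiambu', 'Machakos']
--     },
--     'rift_valley': {
--         'institutions': ['Moi University', 'Catholic Chaplaincy Eldoret', 'Egerton University'],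
--         'counties': ['Uasin Gishu', 'Nakuru', 'Elgeyo Marakwet']
--     },
--     'western': {
--         'institutions': ['Masinde Muliro University', 'Catholic Diocese of Kakamega'],
--         'counties': ['Kakamega', 'Bungoma', 'Vihiga']
--     },
--     'coastal': {
--         'institutions': ['Technical University of Mombasa', 'Catholic Chaplaincy Mombasa'],
--         'counties': ['Mombasa', 'Kilifi', 'Kwale']
--     },
--     'central': {
--         'institutions': ['Dedan Kimathi University', 'Catholic Diocese of Nyeri'],
--         'counties': ['Nyeri', 'Murang\'a', 'Kirinyaga']
--     }
-- }
--
-- # Reverse-lookup indexes built once; setdefault keeps first-match semantics.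
-- INSTITUTION_TO_REGION = {}
-- COUNTY_TO_REGION = {}
-- for _region, _data in REGION_MAPPING.items():
--     for _inst in _data['institutions']:
--         INSTITUTION_TO_REGION.setdefault(_inst, _region)
--     for _county in _data['counties']:
--         COUNTY_TO_REGION.setdefault(_county, _region)
--
-- def auto_assign_region(occupation, institution=None, residence=None):
--     """Auto-assign region via precomputed reverse-lookup dicts"""
--     if occupation == 'Student' and institution:
--         return INSTITUTION_TO_REGION.get(institution, 'nairobi')
--     if occupation == 'Alumni' and residence:
--         return COUNTY_TO_REGION.get(residence, 'nairobi')
--     return 'nairobi'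
-- ===== Notes on version B (the rewrite author's own statement) =====
-- stated objective: idiomatic
-- what changed: Replaces the per-call scan over REGION_MAPPING's region lists with two module-level reverse-lookup dicts built once (setdefault preserves first-match), so each call is a single dict lookup with 'nairobi' as default.
import Mathlib
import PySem

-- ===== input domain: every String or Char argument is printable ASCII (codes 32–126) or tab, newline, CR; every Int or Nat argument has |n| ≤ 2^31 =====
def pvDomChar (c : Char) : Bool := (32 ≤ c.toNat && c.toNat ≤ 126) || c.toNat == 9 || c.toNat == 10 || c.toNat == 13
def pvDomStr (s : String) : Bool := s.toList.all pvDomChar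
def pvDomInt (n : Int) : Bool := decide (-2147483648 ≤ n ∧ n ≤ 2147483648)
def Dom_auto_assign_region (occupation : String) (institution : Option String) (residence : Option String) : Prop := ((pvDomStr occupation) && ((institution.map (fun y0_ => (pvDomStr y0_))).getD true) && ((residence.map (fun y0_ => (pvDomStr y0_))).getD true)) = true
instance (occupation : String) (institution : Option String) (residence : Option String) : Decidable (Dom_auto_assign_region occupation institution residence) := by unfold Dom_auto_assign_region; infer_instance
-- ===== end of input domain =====

-- B replaces A's per-call scan over REGION_MAPPING with precomputed reverse-lookup dicts (idiomatic; return value unchanged).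


-- ===== PORT A =====
-- REGION_MAPPING as a list (region, institutions, counties) in insertion order
def pvRegions : List (String × List String × List String) :=
  [("nairobi",
    ["Kenyatta University", "University of Nairobi", "Tangaza University College", "Consolata Shrine Parish", "St. Paul's University Chapel"],
    ["Nairobi", "Kiambu", "Machakos"]),
   ("rift_valley",
    ["Moi University", "Catholic Chaplaincy Eldoret", "Egerton University"],
    ["Uasin Gishu", "Nakuru", "Elgeyo Marakwet"]),
   ("western",
    ["Masinde Muliro University", "Catholic Diocese of Kakamega"],
    ["Kakamega", "Bungoma", "Vihiga"]),
   ("coastal",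
    ["Technical University of Mombasa", "Catholic Chaplaincy Mombasa"],
    ["Mombasa", "Kilifi", "Kwale"]),
   ("central",
    ["Dedan Kimathi University", "Catholic Diocese of Nyeri"],
    ["Nyeri", "Murang'a", "Kirinyaga"])]

-- Python truthiness of an optional string: None and '' are falsy
def pvTruthy : Option String → Bool
  | none => false
  | some s => s ≠ ""

-- A's for-loop: scan regions, return first region whose institutions list contains inst
def pvScanInst (inst : String) : List (String × List String × List String) → Option String
  | [] => none
  | (r, insts, _) :: rest => if insts.contains inst then some r else pvScanInst inst rest

-- A's second for-loop, over the counties lists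
def pvScanCounty (res : String) : List (String × List String × List String) → Option String
  | [] => none
  | (r, _, cs) :: rest => if cs.contains res then some r else pvScanCounty res rest

def auto_assign_region (occupation : String) (institution : Option String) (residence : Option String) : String :=
  if occupation == "Student" && pvTruthy institution then
    match pvScanInst (institution.getD "") pvRegions with
    | some r => r
    | none => "nairobi"
  else if occupation == "Alumni" && pvTruthy residence then
    match pvScanCounty (residence.getD "") pvRegions with
    | some r => r
    | none => "nairobi"
  else "nairobi"

-- ===== PORT B =====
-- d.setdefault(k, v): record only if not already present (first match wins)
def pvSetdefault (d : PySem.Dict String String) (k v : String) : PySem.Dict String String :=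
  if d.contains k then d else d.insert k v

-- module-level reverse-lookup dicts, built by iterating REGION_MAPPING once
def INSTITUTION_TO_REGION : PySem.Dict String String :=
  pvRegions.foldl (fun d rd =>
    rd.2.1.foldl (fun d i => pvSetdefault d i rd.1) d) PySem.Dict.empty

def COUNTY_TO_REGION : PySem.Dict String String :=
  pvRegions.foldl (fun d rd =>
    rd.2.2.foldl (fun d c => pvSetdefault d c rd.1) d) PySem.Dict.empty

def auto_assign_region_alt (occupation : String) (institution : Option String) (residence : Option String) : String :=
  if occupation == "Student" && pvTruthy institution then
    INSTITUTION_TO_REGION.getD (institution.getD "") "nairobi"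
  else if occupation == "Alumni" && pvTruthy residence then
    COUNTY_TO_REGION.getD (residence.getD "") "nairobi"
  else "nairobi"

-- ===== PRECONDITION & SPEC =====
def Spec_auto_assign_region (occupation : String) (institution : Option String) (residence : Option String) (out : String) : Prop := out = auto_assign_region_alt occupation institution residence
instance (occupation : String) (institution : Option String) (residence : Option String) (out : String) : Decidable (Spec_auto_assign_region occupation institution residence out) := by unfold Spec_auto_assign_region; infer_instance

-- ===== CLAIM (what is proved, stated in full; the proofs are below) =====
def Claim_equal_auto_assign_region : Prop := ∀ (occupation : String) (institution : Option String) (residence : Option String), Dom_auto_assign_region occupation institution residence → Spec_auto_assign_region occupation institution residence (auto_assign_region occupation institution residence)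

-- ===== LEMMAS AND PROOFS =====
lemma inst_lookup (s : String) :
    INSTITUTION_TO_REGION.getD s "nairobi"
      = (match pvScanInst s pvRegions with | some r => r | none => "nairobi") := by
  have hd : INSTITUTION_TO_REGION = PySem.Dict.mk
    [("Kenyatta University", "nairobi"),
     ("University of Nairobi", "nairobi"),
     ("Tangaza University College", "nairobi"),
     ("Consolata Shrine Parish", "nairobi"),
     ("St. Paul's University Chapel", "nairobi"),
     ("Moi University", "rift_valley"),
     ("Catholic Chaplaincy Eldoret", "rift_valley"),
     ("Egerton University", "rift_valley"),
     ("Masinde Muliro University", "western"),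
     ("Catholic Diocese of Kakamega", "western"),
     ("Technical University of Mombasa", "coastal"),
     ("Catholic Chaplaincy Mombasa", "coastal"),
     ("Dedan Kimathi University", "central"),
     ("Catholic Diocese of Nyeri", "central")] := by decide
  rw [hd]
  by_cases h0 : s = "Kenyatta University"
  · subst h0; decide
  by_cases h1 : s = "University of Nairobi"
  · subst h1; decide
  by_cases h2 : s = "Tangaza University College"
  · subst h2; decide
  by_cases h3 : s = "Consolata Shrine Parish"
  · subst h3; decide
  by_cases h4 : s = "St. Paul's University Chapel"
  · subst h4; decide
  by_cases h5 : s = "Moi University"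
  · subst h5; decide
  by_cases h6 : s = "Catholic Chaplaincy Eldoret"
  · subst h6; decide
  by_cases h7 : s = "Egerton University"
  · subst h7; decide
  by_cases h8 : s = "Masinde Muliro University"
  · subst h8; decide
  by_cases h9 : s = "Catholic Diocese of Kakamega"
  · subst h9; decide
  by_cases h10 : s = "Technical University of Mombasa"
  · subst h10; decide
  by_cases h11 : s = "Catholic Chaplaincy Mombasa"
  · subst h11; decide
  by_cases h12 : s = "Dedan Kimathi University"
  · subst h12; decide
  by_cases h13 : s = "Catholic Diocese of Nyeri"
  · subst h13; decide
  have h0' := Ne.symm h0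
  have h1' := Ne.symm h1
  have h2' := Ne.symm h2
  have h3' := Ne.symm h3
  have h4' := Ne.symm h4
  have h5' := Ne.symm h5
  have h6' := Ne.symm h6
  have h7' := Ne.symm h7
  have h8' := Ne.symm h8
  have h9' := Ne.symm h9
  have h10' := Ne.symm h10
  have h11' := Ne.symm h11
  have h12' := Ne.symm h12
  have h13' := Ne.symm h13
  simp [pvScanInst, pvRegions, PySem.Dict.getD, PySem.Dict.get?, h0, h1, h2, h3, h4, h5, h6, h7, h8, h9, h10, h11, h12, h13, h0', h1', h2', h3', h4', h5', h6', h7', h8', h9', h10', h11', h12', h13']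

lemma county_lookup (s : String) :
    COUNTY_TO_REGION.getD s "nairobi"
      = (match pvScanCounty s pvRegions with | some r => r | none => "nairobi") := by
  have hd : COUNTY_TO_REGION = PySem.Dict.mk
    [("Nairobi", "nairobi"),
     ("Kiambu", "nairobi"),
     ("Machakos", "nairobi"),
     ("Uasin Gishu", "rift_valley"),
     ("Nakuru", "rift_valley"),
     ("Elgeyo Marakwet", "rift_valley"),
     ("Kakamega", "western"),
     ("Bungoma", "western"),
     ("Vihiga", "western"),
     ("Mombasa", "coastal"),
     ("Kilifi", "coastal"),
     ("Kwale", "coastal"),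
     ("Nyeri", "central"),
     ("Murang'a", "central"),
     ("Kirinyaga", "central")] := by decide
  rw [hd]
  by_cases h0 : s = "Nairobi"
  · subst h0; decide
  by_cases h1 : s = "Kiambu"
  · subst h1; decide
  by_cases h2 : s = "Machakos"
  · subst h2; decide
  by_cases h3 : s = "Uasin Gishu"
  · subst h3; decide
  by_cases h4 : s = "Nakuru"
  · subst h4; decide
  by_cases h5 : s = "Elgeyo Marakwet"
  · subst h5; decide
  by_cases h6 : s = "Kakamega"
  · subst h6; decide
  by_cases h7 : s = "Bungoma"
  · subst h7; decide
  by_cases h8 : s = "Vihiga"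
  · subst h8; decide
  by_cases h9 : s = "Mombasa"
  · subst h9; decide
  by_cases h10 : s = "Kilifi"
  · subst h10; decide
  by_cases h11 : s = "Kwale"
  · subst h11; decide
  by_cases h12 : s = "Nyeri"
  · subst h12; decide
  by_cases h13 : s = "Murang'a"
  · subst h13; decide
  by_cases h14 : s = "Kirinyaga"
  · subst h14; decide
  have h0' := Ne.symm h0
  have h1' := Ne.symm h1
  have h2' := Ne.symm h2
  have h3' := Ne.symm h3
  have h4' := Ne.symm h4
  have h5' := Ne.symm h5
  have h6' := Ne.symm h6
  have h7' := Ne.symm h7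
  have h8' := Ne.symm h8
  have h9' := Ne.symm h9
  have h10' := Ne.symm h10
  have h11' := Ne.symm h11
  have h12' := Ne.symm h12
  have h13' := Ne.symm h13
  have h14' := Ne.symm h14
  simp [pvScanCounty, pvRegions, PySem.Dict.getD, PySem.Dict.get?, h0, h1, h2, h3, h4, h5, h6, h7, h8, h9, h10, h11, h12, h13, h14, h0', h1', h2', h3', h4', h5', h6', h7', h8', h9', h10', h11', h12', h13', h14']

-- ===== VERDICT (by name: the statement is the Claim_ definition above) =====
theorem auto_assign_region_spec : Claim_equal_auto_assign_region := by
  intro occupation institution residence _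
  unfold Spec_auto_assign_region auto_assign_region auto_assign_region_alt
  split_ifs with h1 h2
  · exact (inst_lookup _).symm
  · exact (county_lookup _).symm
  · rfl
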